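-- pv_equiv track=rewrite | github.com/Jonahowns/TCR_Analysis | Kmethods.py | gen_indices
-- ===== SOURCE A (Python) =====
-- import math
--
-- def gen_indices(bPni, N):
--     ind = []
--     for xid, x in enumerate(bPni):
--         sep = math.floor((N - 2) / x)
--         for i in range(x):
--             if i == 0:
--                 ind.append(xid)
--                 ind.append(0)
--                 ind.append(sep)
--             elif i == x-1:
--                 ind.append(ind[-1])
--                 ind.insert(-1, xid)
--                 ind.append(N-2)
--             else:
--                 ind.append(ind[-1])
--                 ind.insert(-1, xid)
--                 ind.append(ind[-1]+sep)
--     it = iter(ind)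
--     tup = list(zip(it, it, it))
--     return tup
-- ===== SOURCE B (Python) =====
-- import math
--
-- def gen_indices(bPni, N):
--     # Build the triples directly with closed-form start/end indices:
--     # block xid of size x contributes (xid, i*sep, (i+1)*sep), the last
--     # triple ending at N-2 (for x == 1, sep == N-2, matching A).
--     tup = []
--     for xid, x in enumerate(bPni):
--         sep = (N - 2) // x
--         for i in range(x):
--             tup.append((xid, i * sep, N - 2 if i == x - 1 else (i + 1) * sep))
--     return tup
-- ===== Notes on version B (the rewrite author's own statement) =====
-- stated objective: simpler
-- what changed: B builds the list of triples directly with a closed-form start index i*sep instead of A's flat list driven by a running accumulator (reading ind[-1], insert(-1,...)) that is reassembled into triples by zip at the end.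
import Mathlib
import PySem

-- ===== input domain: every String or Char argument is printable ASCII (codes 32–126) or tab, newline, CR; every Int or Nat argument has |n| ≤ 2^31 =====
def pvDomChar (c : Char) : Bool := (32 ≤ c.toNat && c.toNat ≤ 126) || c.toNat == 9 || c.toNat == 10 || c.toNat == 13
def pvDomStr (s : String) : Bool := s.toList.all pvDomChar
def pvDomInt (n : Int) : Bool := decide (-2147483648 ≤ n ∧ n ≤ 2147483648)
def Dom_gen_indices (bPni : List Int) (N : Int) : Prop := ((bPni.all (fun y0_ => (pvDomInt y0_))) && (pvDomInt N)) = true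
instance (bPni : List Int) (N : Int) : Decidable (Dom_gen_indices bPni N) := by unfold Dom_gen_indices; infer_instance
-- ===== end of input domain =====

-- B builds the list of triples directly with a closed-form start index instead of A's
-- flat accumulator list (reading ind[-1] and insert(-1, ...)) reassembled by zip.


-- ===== PORT A =====
-- zip(it, it, it) over ONE iterator: consume the flat list three at a time
def pvChunk3 : List Int → List (Int × Int × Int)
  | a :: b :: c :: rest => (a, b, c) :: pvChunk3 rest
  | _ => []

-- math.floor((N-2)/x) is ported as floor division: exact for |N|,|x| ≤ 2^31
-- (the float quotient of 32-bit ints never rounds across an integer).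
def gen_indices (bPni : List Int) (N : Int) : List (Int × Int × Int) :=
  let ind := (PySem.List.enumerate bPni).foldl (fun ind p =>
    let xid := p.1
    let x := p.2
    let sep := PySem.Int.floordiv (N - 2) x
    (PySem.List.pyRange 0 x 1).foldl (fun ind i =>
      if i = 0 then
        ((ind ++ [xid]) ++ [(0 : Int)]) ++ [sep]
      else if i = x - 1 then
        let ind1 := ind ++ [PySem.List.pyGetD ind (-1) 0]
        let ind2 := PySem.List.insert ind1 (-1) xid
        ind2 ++ [N - 2]
      else
        let ind1 := ind ++ [PySem.List.pyGetD ind (-1) 0]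
        let ind2 := PySem.List.insert ind1 (-1) xid
        ind2 ++ [PySem.List.pyGetD ind2 (-1) 0 + sep]) ind) []
  pvChunk3 ind

-- ===== PORT B =====
def gen_indices_alt (bPni : List Int) (N : Int) : List (Int × Int × Int) :=
  (PySem.List.enumerate bPni).foldl (fun tup p =>
    let xid := p.1
    let x := p.2
    let sep := PySem.Int.floordiv (N - 2) x
    (PySem.List.pyRange 0 x 1).foldl (fun tup i =>
      tup ++ [(xid, i * sep, if i = x - 1 then N - 2 else (i + 1) * sep)]) tup) []

-- ===== PRECONDITION & SPEC =====
-- Pre_ excludes only the inputs where Python A raises ZeroDivisionError (a block size of 0).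
def Pre_gen_indices (bPni : List Int) (N : Int) : Prop := (0 : Int) ∉ bPni
instance (bPni : List Int) (N : Int) : Decidable (Pre_gen_indices bPni N) := by unfold Pre_gen_indices; infer_instance
def pvWitness_gen_indices : List Int × Int := ([2, 3, 1, -1], 12)

def Spec_gen_indices (bPni : List Int) (N : Int) (out : List (Int × Int × Int)) : Prop := out = gen_indices_alt bPni N
instance (bPni : List Int) (N : Int) (out : List (Int × Int × Int)) : Decidable (Spec_gen_indices bPni N out) := by unfold Spec_gen_indices; infer_instance

-- ===== CLAIM (what is proved, stated in full; the proofs are below) =====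
def Claim_equal_gen_indices : Prop := ∀ (bPni : List Int) (N : Int), Dom_gen_indices bPni N → Pre_gen_indices bPni N → Spec_gen_indices bPni N (gen_indices bPni N)

-- ===== LEMMAS AND PROOFS =====

-- flatten a triple list back into the flat shape A accumulates
def pvFlat3 (l : List (Int × Int × Int)) : List Int := l.flatMap (fun t => [t.1, t.2.1, t.2.2])

-- one triple of B's block
def pvTrip (N x xid sep : Int) (i : Int) : Int × Int × Int :=
  (xid, i * sep, if i = x - 1 then N - 2 else (i + 1) * sep)

-- one whole block of B
def pvBlock (N : Int) (p : Int × Int) : List (Int × Int × Int) :=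
  (PySem.List.pyRange 0 p.2 1).map (pvTrip N p.2 p.1 (PySem.Int.floordiv (N - 2) p.2))

-- the "middle" triples of one block, i = 0 .. k-1, all before the last index
def pvMid (xid sep : Int) (k : Nat) : List (Int × Int × Int) :=
  (List.range k).map (fun i => (xid, (i : Int) * sep, ((i : Int) + 1) * sep))

lemma pvChunk3_flat3 (l : List (Int × Int × Int)) : pvChunk3 (pvFlat3 l) = l := by
  induction l with
  | nil => rfl
  | cons t r ih => simp [pvFlat3, pvChunk3] at ih ⊢; exact ih

lemma pvFlat3_append (l m : List (Int × Int × Int)) :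
    pvFlat3 (l ++ m) = pvFlat3 l ++ pvFlat3 m := by
  simp [pvFlat3]

-- Python's ind.insert(-1, x): insert just before the last element
lemma pvInsert_append_last (ys : List Int) (a x : Int) :
    PySem.List.insert (ys ++ [a]) (-1) x = ys ++ [x, a] := by
  simp [PySem.List.insert, PySem.List.sliceIndices]

lemma pvMid_succ (xid sep : Int) (k : Nat) :
    pvMid xid sep (k + 1) = pvMid xid sep k ++ [(xid, (k : Int) * sep, ((k : Int) + 1) * sep)] := by
  simp [pvMid, List.range_succ]

-- A's inner loop over range(k), k ≤ x-1, appends exactly the flat middle triples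
lemma pvMidA (N xid x sep : Int) (k : Nat) (hk : (k : Int) ≤ x - 1) (ind : List Int) :
    (PySem.List.pyRange 0 (k : Int) 1).foldl (fun ind i =>
      if i = 0 then
        ((ind ++ [xid]) ++ [(0 : Int)]) ++ [sep]
      else if i = x - 1 then
        let ind1 := ind ++ [PySem.List.pyGetD ind (-1) 0]
        let ind2 := PySem.List.insert ind1 (-1) xid
        ind2 ++ [N - 2]
      else
        let ind1 := ind ++ [PySem.List.pyGetD ind (-1) 0]
        let ind2 := PySem.List.insert ind1 (-1) xid
        ind2 ++ [PySem.List.pyGetD ind2 (-1) 0 + sep]) ind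
    = ind ++ pvFlat3 (pvMid xid sep k) := by
  induction k with
  | zero => simp [pvMid, pvFlat3]
  | succ j ih =>
    have hj : (j : Int) ≤ x - 1 := by push_cast at hk ⊢; omega
    have hcast : ((j + 1 : Nat) : Int) = (j : Int) + 1 := by push_cast; ring
    rw [hcast, PySem.List.pyRange_one_succ_right (by positivity), List.foldl_append, ih hj]
    simp only [List.foldl_cons, List.foldl_nil]
    cases j with
    | zero =>
      rw [if_pos (by norm_num)]
      simp [pvMid, pvFlat3, List.range_succ]
    | succ m =>
      have h0 : ((m + 1 : Nat) : Int) ≠ 0 := by push_cast; omega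
      have hx : ((m + 1 : Nat) : Int) ≠ x - 1 := by push_cast at hk ⊢; omega
      rw [if_neg h0, if_neg hx]
      rw [pvMid_succ xid sep m]
      rw [pvFlat3, List.flatMap_append]
      simp only [List.flatMap_cons, List.flatMap_nil, List.append_nil]
      have shape : ind ++ ((pvMid xid sep m).flatMap (fun t => [t.1, t.2.1, t.2.2]) ++ [xid, (m : Int) * sep, ((m : Int) + 1) * sep])
          = (ind ++ (pvMid xid sep m).flatMap (fun t => [t.1, t.2.1, t.2.2]) ++ [xid, (m : Int) * sep]) ++ [((m : Int) + 1) * sep] := by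
        simp
      rw [shape, PySem.List.pyGetD_neg_one_append_singleton, pvInsert_append_last]
      rw [pvMid_succ, pvMid_succ, pvFlat3, List.flatMap_append, List.flatMap_append]
      have shape2 : ∀ (S : List Int) (a b : Int), S ++ [a, b] = (S ++ [a]) ++ [b] := by simp
      rw [shape2, PySem.List.pyGetD_neg_one_append_singleton]
      push_cast
      simp
      ring_nf

-- the middle part of B's block: the i == x-1 test never fires
lemma pvMapMid (N xid x sep : Int) (j : Nat) (hj : (j : Int) ≤ x - 1) :
    (PySem.List.pyRange 0 (j : Int) 1).map (pvTrip N x xid sep) = pvMid xid sep j := by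
  apply List.ext_getElem
  · simp [pvMid, PySem.List.pyRange_zero_natCast]
  · intro n h1 h2
    have hn : n < j := by simpa [pvMid] using h2
    simp [pvMid, pvTrip, PySem.List.pyRange_zero_natCast, ← List.map_eq_flatMap]
    intro hbad
    exfalso
    omega

-- one whole block of A appends exactly the flat form of B's block
lemma pvBlockA (N xid x : Int) (ind : List Int) :
    (PySem.List.pyRange 0 x 1).foldl (fun ind i =>
      if i = 0 then
        ((ind ++ [xid]) ++ [(0 : Int)]) ++ [PySem.Int.floordiv (N - 2) x]
      else if i = x - 1 then
        let ind1 := ind ++ [PySem.List.pyGetD ind (-1) 0]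
        let ind2 := PySem.List.insert ind1 (-1) xid
        ind2 ++ [N - 2]
      else
        let ind1 := ind ++ [PySem.List.pyGetD ind (-1) 0]
        let ind2 := PySem.List.insert ind1 (-1) xid
        ind2 ++ [PySem.List.pyGetD ind2 (-1) 0 + PySem.Int.floordiv (N - 2) x]) ind
    = ind ++ pvFlat3 (pvBlock N (xid, x)) := by
  by_cases hx : x ≤ 0
  · rw [PySem.List.pyRange_one_eq_nil (by omega)]
    simp [pvBlock, PySem.List.pyRange_one_eq_nil (by omega : x ≤ 0), pvFlat3]
  · -- x ≥ 1
    set sep := PySem.Int.floordiv (N - 2) x with hsep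
    obtain ⟨j, hjx⟩ : ∃ j : Nat, x = (j : Int) + 1 := ⟨(x - 1).toNat, by omega⟩
    rcases Nat.eq_zero_or_pos j with hj0 | hjpos
    · -- x = 1
      have hx1 : x = 1 := by subst hj0; push_cast at hjx; omega
      rw [show PySem.List.pyRange 0 x 1 = [(0 : Int)] from by
        rw [hx1]; simpa using PySem.List.pyRange_one_singleton (a := (0 : Int))]
      simp only [List.foldl_cons, List.foldl_nil]
      have hs : sep = N - 2 := by
        rw [hsep, hx1, PySem.Int.floordiv_eq_ediv_of_pos (by norm_num), Int.ediv_one]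
      rw [hs]
      have hB : pvBlock N (xid, x) = [(xid, 0, N - 2)] := by
        rw [pvBlock]
        rw [show PySem.List.pyRange 0 x 1 = [(0 : Int)] from by
          rw [hx1]; simpa using PySem.List.pyRange_one_singleton (a := (0 : Int))]
        simp [pvTrip, if_pos (by omega : (0 : Int) = x - 1)]
      rw [hB]
      simp [pvFlat3]
    · -- x = j + 1, j ≥ 1
      have hrange : PySem.List.pyRange 0 x 1 = PySem.List.pyRange 0 (j : Int) 1 ++ [(j : Int)] := by
        rw [hjx, PySem.List.pyRange_one_succ_right (by positivity)]
      rw [hrange, List.foldl_append, pvMidA N xid x sep j (by omega)]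
      simp only [List.foldl_cons, List.foldl_nil]
      rw [if_neg (by omega), if_pos (by omega)]
      obtain ⟨m, hm⟩ : ∃ m : Nat, j = m + 1 := ⟨j - 1, by omega⟩
      subst hm
      rw [pvMid_succ]
      rw [pvFlat3, List.flatMap_append]
      simp only [List.flatMap_cons, List.flatMap_nil, List.append_nil]
      have shape : ind ++ ((pvMid xid sep m).flatMap (fun t => [t.1, t.2.1, t.2.2]) ++ [xid, (m : Int) * sep, ((m : Int) + 1) * sep])
          = (ind ++ (pvMid xid sep m).flatMap (fun t => [t.1, t.2.1, t.2.2]) ++ [xid, (m : Int) * sep]) ++ [((m : Int) + 1) * sep] := by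
        simp
      rw [shape, PySem.List.pyGetD_neg_one_append_singleton, pvInsert_append_last]
      have hB : pvBlock N (xid, x) = pvMid xid sep (m + 1) ++ [(xid, ((m + 1 : Nat) : Int) * sep, N - 2)] := by
        rw [pvBlock]
        simp only
        rw [hrange, List.map_append, pvMapMid N xid x sep (m + 1) (by omega), ← hsep]
        simp only [List.map_cons, List.map_nil, pvTrip]
        rw [if_pos (by omega)]
      rw [hB, pvFlat3, List.flatMap_append]
      simp only [List.flatMap_cons, List.flatMap_nil, List.append_nil]
      rw [pvMid_succ, List.flatMap_append]
      simp only [List.flatMap_cons, List.flatMap_nil, List.append_nil]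
      push_cast
      simp

-- A's whole loop over the enumerated blocks
lemma pvOuterA (N : Int) (l : List (Int × Int)) (ind : List Int) :
    l.foldl (fun ind p =>
      (PySem.List.pyRange 0 p.2 1).foldl (fun ind i =>
        if i = 0 then
          ((ind ++ [p.1]) ++ [(0 : Int)]) ++ [PySem.Int.floordiv (N - 2) p.2]
        else if i = p.2 - 1 then
          let ind1 := ind ++ [PySem.List.pyGetD ind (-1) 0]
          let ind2 := PySem.List.insert ind1 (-1) p.1
          ind2 ++ [N - 2]
        else
          let ind1 := ind ++ [PySem.List.pyGetD ind (-1) 0]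
          let ind2 := PySem.List.insert ind1 (-1) p.1
          ind2 ++ [PySem.List.pyGetD ind2 (-1) 0 + PySem.Int.floordiv (N - 2) p.2]) ind) ind
    = ind ++ pvFlat3 (l.flatMap (pvBlock N)) := by
  induction l generalizing ind with
  | nil => simp [pvFlat3]
  | cons p r ih =>
    simp only [List.foldl_cons]
    rw [pvBlockA N p.1 p.2 ind, ih]
    simp [pvFlat3_append]

-- B's whole loop is the flatMap of its blocks
lemma pvOuterB (N : Int) (l : List (Int × Int)) (acc : List (Int × Int × Int)) :
    l.foldl (fun tup p =>
      (PySem.List.pyRange 0 p.2 1).foldl (fun tup i =>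
        tup ++ [(p.1, i * PySem.Int.floordiv (N - 2) p.2,
          if i = p.2 - 1 then N - 2 else (i + 1) * PySem.Int.floordiv (N - 2) p.2)]) tup) acc
    = acc ++ l.flatMap (pvBlock N) := by
  induction l generalizing acc with
  | nil => simp
  | cons p r ih =>
    simp only [List.foldl_cons]
    rw [PySem.List.foldl_append_singleton_eq_map, ih]
    simp [pvBlock, pvTrip]

lemma pvAlt_eq (bPni : List Int) (N : Int) :
    gen_indices_alt bPni N = (PySem.List.enumerate bPni).flatMap (pvBlock N) := by
  unfold gen_indices_alt
  rw [pvOuterB]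
  simp

-- ===== VERDICT (by name: the statement is the Claim_ definition above) =====
theorem gen_indices_spec : Claim_equal_gen_indices := by
  intro bPni N _ _
  unfold Spec_gen_indices gen_indices
  rw [pvOuterA, pvAlt_eq, List.nil_append, pvChunk3_flat3]
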